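-- pv_equiv track=rewrite | github.com/LeoAlvian/Leetcode | JumpGameVII.py | jumpGameVII
-- ===== SOURCE A (Python) =====
-- from collections import deque
--
-- def jumpGameVII(s, minJump, maxJump):
--     n = len(s) - 1
--
--     # Check if the last string is 1 if it is which means we cannot reach the end so we
--     # return False immediately
--     if s[-1] == '1':
--         return False
--
--     # Check if n % minJump == 0 means if we can jump to the end with minJump if we cannot
--     # we return False
--     # if True we check if all element in minJump distant is 0
--     elif minJump == maxJump:
--         return n % minJump == 0 and all(c == '0' for c in s[minJump:n:minJump])
--
--     # Check if 1 * maxJump string in s, if it is then return False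
--     elif minJump == 1:
--         return '1' * maxJump not in s
--
--     # if all the check above is not valid we use BFS Algorithm
--     q, farthest = deque([0]), 0
--
--     while q:
--         i = q.popleft()
--         start = max(i + minJump, farthest + 1)
--         for j in range(start, min(i + maxJump + 1, len(s))):
--             if s[j] == '0':
--                 if j == len(s) - 1:
--                     return True
--                 q.append(j)
--         farthest = i + maxJump
--
--     return False
-- ===== SOURCE B (Python) =====
-- def jumpGameVII(s, minJump, maxJump):
--     n = len(s) - 1
--
--     # same three guard branches as the original
--     if s[-1] == '1':
--         return False
--     elif minJump == maxJump:
--         return n % minJump == 0 and all(c == '0' for c in s[minJump:n:minJump])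
--     elif minJump == 1:
--         return '1' * maxJump not in s
--
--     # sliding-window prefix-sum reachability DP instead of the BFS queue:
--     # pre[i] = number of reachable positions among 0..i-1 (position 0 is reachable).
--     pre = [0, 1]
--     for j in range(1, n + 1):
--         lo = max(j - maxJump, 0)
--         hi = min(j - minJump, j - 1)
--         ok = s[j] == '0' and lo <= hi and pre[hi + 1] - pre[lo] > 0
--         if j == n:
--             return ok
--         pre.append(pre[-1] + (1 if ok else 0))
--     return False
-- ===== Notes on version B (the rewrite author's own statement) =====
-- stated objective: alternative
-- what changed: The BFS core (deque frontier + farthest pruning) is replaced by a forward sliding-window reachability DP over a prefix-sum array of reachable-position counts; the three guard branches are kept as in A.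
import Mathlib
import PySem

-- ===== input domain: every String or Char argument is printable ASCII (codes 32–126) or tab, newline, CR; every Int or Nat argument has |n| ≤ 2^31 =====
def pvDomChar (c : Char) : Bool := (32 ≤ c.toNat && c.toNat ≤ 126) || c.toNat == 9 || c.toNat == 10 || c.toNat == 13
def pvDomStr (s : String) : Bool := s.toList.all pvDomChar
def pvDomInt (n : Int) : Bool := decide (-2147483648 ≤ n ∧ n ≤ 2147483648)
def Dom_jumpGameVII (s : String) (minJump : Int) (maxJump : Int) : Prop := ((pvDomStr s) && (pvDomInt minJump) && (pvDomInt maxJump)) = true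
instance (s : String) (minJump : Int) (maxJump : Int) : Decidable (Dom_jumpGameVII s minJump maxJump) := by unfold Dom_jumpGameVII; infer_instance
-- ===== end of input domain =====

-- B replaces A's BFS-with-deque core by a sliding-window prefix-sum reachability DP
-- (same guard branches, same return values); Pre_ excludes only the inputs where the
-- Python raises (empty string; minJump == maxJump == 0 reached).


-- ===== PORT A =====
-- inner 'for j in range(start, stop): if s[j]=='0': if j==len(s)-1: return True; q.append(j)'
-- (none = the 'return True' path; some q' = the queue after the appends)
def jgInner (cs : List Char) (js : List Int) (acc : List Int) : Option (List Int) :=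
  match js with
  | [] => some acc
  | j :: rest =>
    if PySem.List.pyGet? cs j = some '0' then
      if j = (cs.length : Int) - 1 then none
      else jgInner cs rest (acc ++ [j])
    else jgInner cs rest acc

-- 'while q: …' — fuel cs.length bounds the number of pops (each popped position is
-- strictly larger than the previous one and < len(s)-1, plus the initial 0)
def jgBFS (cs : List Char) (mj Mj : Int) : Nat → List Int → Int → Bool
  | 0, _, _ => false
  | _ + 1, [], _ => false
  | fuel + 1, i :: rest, far =>
    match jgInner cs (PySem.List.pyRange (max (i + mj) (far + 1)) (min (i + Mj + 1) (cs.length : Int)) 1) rest with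
    | none => true
    | some q' => jgBFS cs mj Mj fuel q' (i + Mj)

def jumpGameVII (s : String) (minJump : Int) (maxJump : Int) : Bool :=
  let cs := s.toList
  let n : Int := (cs.length : Int) - 1
  if PySem.List.pyGet? cs (-1) = some '1' then false   -- s[-1] == '1' (IndexError on "" is outside Pre_)
  else if minJump = maxJump then
    decide (PySem.Int.mod n minJump = 0) &&
      (match PySem.List.slice? cs (some minJump) (some n) minJump with  -- s[minJump:n:minJump]
       | some l => l.all (fun c => c == '0')
       | none => false)   -- step 0: Python raises; outside Pre_
  else if minJump = 1 then
    !(PySem.Chars.isIn (List.replicate maxJump.toNat '1') cs)   -- '1' * maxJump not in s ('' for maxJump ≤ 0, as in Python)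
  else
    jgBFS cs minJump maxJump cs.length [0] 0

-- ===== PORT B =====
-- 'for j in range(1, n+1): …' of Source B; pre is the prefix-sum list, pyGetD is exact here
-- because every index used is provably in range (0 ≤ lo ≤ hi+1 ≤ len(pre)-1)
def jgWindow (cs : List Char) (mj Mj n : Int) : List Int → List Int → Bool
  | [], _ => false
  | j :: rest, pre =>
    let lo := max (j - Mj) 0
    let hi := min (j - mj) (j - 1)
    let ok := (PySem.List.pyGet? cs j == some '0') && decide (lo ≤ hi) &&
      decide (0 < PySem.List.pyGetD pre (hi + 1) 0 - PySem.List.pyGetD pre lo 0)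
    if j = n then ok
    else jgWindow cs mj Mj n rest (pre ++ [PySem.List.pyGetD pre (-1) 0 + if ok then 1 else 0])

def jumpGameVII_alt (s : String) (minJump : Int) (maxJump : Int) : Bool :=
  let cs := s.toList
  let n : Int := (cs.length : Int) - 1
  if PySem.List.pyGet? cs (-1) = some '1' then false
  else if minJump = maxJump then
    decide (PySem.Int.mod n minJump = 0) &&
      (match PySem.List.slice? cs (some minJump) (some n) minJump with
       | some l => l.all (fun c => c == '0')
       | none => false)
  else if minJump = 1 then
    !(PySem.Chars.isIn (List.replicate maxJump.toNat '1') cs)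
  else
    jgWindow cs minJump maxJump n (PySem.List.pyRange 1 (n + 1) 1) [0, 1]

-- ===== PRECONDITION & SPEC =====
-- Pre_ excludes exactly the inputs where A raises: the empty string (IndexError on s[-1])
-- and minJump == maxJump == 0 when that branch is reached (ZeroDivisionError on n % minJump).
def Pre_jumpGameVII (s : String) (minJump : Int) (maxJump : Int) : Prop :=
  s.toList ≠ [] ∧ (s.toList.getLast? = some '1' ∨ minJump ≠ maxJump ∨ minJump ≠ 0)
instance (s : String) (minJump : Int) (maxJump : Int) : Decidable (Pre_jumpGameVII s minJump maxJump) := by unfold Pre_jumpGameVII; infer_instance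

def pvWitness_jumpGameVII : String × Int × Int := ("0100", 2, 3)

def Spec_jumpGameVII (s : String) (minJump : Int) (maxJump : Int) (out : Bool) : Prop := out = jumpGameVII_alt s minJump maxJump
instance (s : String) (minJump : Int) (maxJump : Int) (out : Bool) : Decidable (Spec_jumpGameVII s minJump maxJump out) := by unfold Spec_jumpGameVII; infer_instance

-- ===== CLAIM (what is proved, stated in full; the proofs are below) =====
def Claim_equal_jumpGameVII : Prop := ∀ (s : String) (minJump : Int) (maxJump : Int), Dom_jumpGameVII s minJump maxJump → Pre_jumpGameVII s minJump maxJump → Spec_jumpGameVII s minJump maxJump (jumpGameVII s minJump maxJump)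

-- ===== LEMMAS AND PROOFS =====

-- the window [i+mj, i+Mj] of positions reachable from i
abbrev jgCov (mj Mj i j : Int) : Prop := i + mj ≤ j ∧ j ≤ i + Mj

-- the (sorted) list of reachable positions ≤ k
def jgReaches (cs : List Char) (mj Mj : Int) : Nat → List Int
  | 0 => [0]
  | k + 1 => jgReaches cs mj Mj k ++
      (if cs[k + 1]? = some '0' ∧ ∃ i ∈ jgReaches cs mj Mj k, jgCov mj Mj i ((k + 1 : Nat) : Int)
       then [((k + 1 : Nat) : Int)] else [])

-- the common value of both cores on a nonempty cs
def jgAns (cs : List Char) (mj Mj : Int) : Bool :=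
  decide (2 ≤ cs.length ∧ cs[cs.length - 1]? = some '0' ∧
    ∃ i ∈ jgReaches cs mj Mj (cs.length - 2), jgCov mj Mj i ((cs.length : Int) - 1))

-- ---- basic facts about jgReaches ----

theorem zero_mem_jgReaches (cs : List Char) (mj Mj : Int) (k : Nat) :
    (0 : Int) ∈ jgReaches cs mj Mj k := by
  induction k with
  | zero => simp [jgReaches]
  | succ k ih => simp only [jgReaches]; exact List.mem_append_left _ ih

theorem mem_jgReaches_bounds {cs : List Char} {mj Mj : Int} {k : Nat} {x : Int}
    (hx : x ∈ jgReaches cs mj Mj k) : 0 ≤ x ∧ x ≤ (k : Int) := by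
  induction k with
  | zero => simp [jgReaches] at hx; omega
  | succ k ih =>
    simp only [jgReaches] at hx
    rcases List.mem_append.1 hx with h | h
    · have := ih h; push_cast; omega
    · split at h <;> simp at h
      omega

theorem jgReaches_pairwise (cs : List Char) (mj Mj : Int) (k : Nat) :
    (jgReaches cs mj Mj k).Pairwise (· < ·) := by
  induction k with
  | zero => simp [jgReaches]
  | succ k ih =>
    simp only [jgReaches]
    apply List.pairwise_append.2
    refine ⟨ih, ?_, ?_⟩
    · split <;> simp
    · intro x hx y hy
      split at hy <;> simp at hy
      have := mem_jgReaches_bounds hx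
      omega

theorem mem_jgReaches_mono {cs : List Char} {mj Mj : Int} {k1 k2 : Nat} {x : Int}
    (h : k1 ≤ k2) (hx : x ∈ jgReaches cs mj Mj k1) : x ∈ jgReaches cs mj Mj k2 := by
  induction k2 with
  | zero => have : k1 = 0 := by omega
            exact this ▸ hx
  | succ k2 ih =>
    rcases Nat.lt_or_ge k1 (k2 + 1) with h' | h'
    · simp only [jgReaches]
      exact List.mem_append_left _ (ih (by omega))
    · have : k1 = k2 + 1 := by omega
      exact this ▸ hx

theorem mem_jgReaches_restrict {cs : List Char} {mj Mj : Int} {k1 k2 : Nat} {x : Int}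
    (h : k1 ≤ k2) (hx : x ∈ jgReaches cs mj Mj k2) (hb : x ≤ (k1 : Int)) :
    x ∈ jgReaches cs mj Mj k1 := by
  induction k2 with
  | zero => have : k1 = 0 := by omega
            exact this ▸ hx
  | succ k2 ih =>
    rcases Nat.lt_or_ge k1 (k2 + 1) with h' | h'
    · simp only [jgReaches] at hx
      rcases List.mem_append.1 hx with hx | hx
      · exact ih (by omega) hx
      · split at hx <;> simp at hx
        omega
    · have : k1 = k2 + 1 := by omega
      exact this ▸ hx

theorem mem_jgReaches_succ_iff (cs : List Char) (mj Mj : Int) (k : Nat) :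
    (((k + 1 : Nat) : Int) ∈ jgReaches cs mj Mj (k + 1)) ↔
      (cs[k + 1]? = some '0' ∧ ∃ i ∈ jgReaches cs mj Mj k, jgCov mj Mj i ((k + 1 : Nat) : Int)) := by
  constructor
  · intro hx
    simp only [jgReaches] at hx
    rcases List.mem_append.1 hx with hx | hx
    · have := mem_jgReaches_bounds hx
      omega
    · split at hx
      · assumption
      · simp at hx
  · intro h
    simp only [jgReaches]
    refine List.mem_append_right _ ?_
    rw [if_pos h]; simp

theorem mem_jgReaches_cov {cs : List Char} {mj Mj : Int} {k : Nat} {x : Int}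
    (hx : x ∈ jgReaches cs mj Mj k) (hx0 : x ≠ 0) :
    ∃ i ∈ jgReaches cs mj Mj k, i < x ∧ jgCov mj Mj i x := by
  induction k with
  | zero => simp [jgReaches] at hx; exact absurd hx hx0
  | succ k ih =>
    simp only [jgReaches] at hx
    rcases List.mem_append.1 hx with hx | hx
    · obtain ⟨i, hi, h1, h2⟩ := ih hx
      exact ⟨i, mem_jgReaches_mono (Nat.le_succ k) hi, h1, h2⟩
    · split at hx
      · rename_i hcond
        simp at hx
        obtain ⟨i, hi, hc⟩ := hcond.2
        have hb := mem_jgReaches_bounds hi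
        exact ⟨i, mem_jgReaches_mono (Nat.le_succ k) hi, by omega, hx ▸ hc⟩
      · simp at hx

theorem jgReaches_length_le (cs : List Char) (mj Mj : Int) (k : Nat) :
    (jgReaches cs mj Mj k).length ≤ k + 1 := by
  induction k with
  | zero => simp [jgReaches]
  | succ k ih =>
    simp only [jgReaches, List.length_append]
    have : (if cs[k + 1]? = some '0' ∧ ∃ i ∈ jgReaches cs mj Mj k, jgCov mj Mj i ((k + 1 : Nat) : Int)
            then [((k + 1 : Nat) : Int)] else []).length ≤ 1 := by
      split <;> simp
    omega

-- ---- generic list lemmas used by both loop invariants ----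

-- two strictly increasing lists with the same members are equal
theorem jg_sorted_ext {l1 l2 : List Int} (h1 : l1.Pairwise (· < ·)) (h2 : l2.Pairwise (· < ·))
    (hm : ∀ x, x ∈ l1 ↔ x ∈ l2) : l1 = l2 :=
  List.Perm.eq_of_pairwise (fun a b _ _ hab hba => absurd hba (lt_asymm hab)) h1 h2
    (List.perm_ext_iff_of_nodup h1.nodup h2.nodup |>.2 hm)

-- length of a filter over a half-open window splits at any midpoint
theorem jg_filter_window_split (l : List Int) (a b : Int) (hab : a ≤ b) :
    (l.filter (fun x => decide (x < b))).length
      = (l.filter (fun x => decide (x < a))).length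
        + (l.filter (fun x => decide (a ≤ x ∧ x < b))).length := by
  induction l with
  | nil => simp
  | cons c l ih =>
    simp only [List.filter_cons]
    by_cases h1 : c < a
    · rw [if_pos (by simpa using (by omega : c < b)), if_pos (by simpa using h1),
        if_neg (by simp; omega)]
      simp [ih]
      omega
    · by_cases h2 : c < b
      · rw [if_pos (by simpa using h2), if_neg (by simpa using h1), if_pos (by simp; omega)]
        simp [ih]
        omega
      · rw [if_neg (by simpa using h2), if_neg (by simpa using h1), if_neg (by simp; omega)]
        exact ih

theorem jg_filter_pos_iff (l : List Int) (p : Int → Bool) :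
    0 < (l.filter p).length ↔ ∃ x ∈ l, p x = true := by
  rw [List.length_pos_iff_exists_mem]
  simp [List.mem_filter]

-- a Nodup list: the count of elements in [t, t+1) is 1 or 0 according to membership of t
theorem jg_filter_single (l : List Int) (hnd : l.Nodup) (t : Int) :
    (l.filter (fun x => decide (t ≤ x ∧ x < t + 1))).length = if t ∈ l then 1 else 0 := by
  have : l.filter (fun x => decide (t ≤ x ∧ x < t + 1)) = l.filter (fun x => decide (x = t)) := by
    apply List.filter_congr
    intro x _
    simp only [decide_eq_decide]
    omega
  rw [this]
  clear this
  induction l with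
  | nil => simp
  | cons a l ih =>
    have hnd' := List.nodup_cons.1 hnd
    simp only [List.filter_cons]
    by_cases ha : a = t
    · subst ha
      rw [if_pos (by simp)]
      simp only [List.length_cons, if_pos (List.mem_cons_self)]
      have : l.filter (fun x => decide (x = a)) = [] :=
        List.filter_eq_nil_iff.2 (fun x hx => by
          simp only [decide_eq_true_eq]
          intro hxa
          exact hnd'.1 (hxa ▸ hx))
      simp [this]
    · rw [if_neg (by simpa using ha)]
      rw [ih hnd'.2]
      by_cases htl : t ∈ l
      · simp [htl, List.mem_cons]
      · simp [htl, List.mem_cons, show ¬ t = a from fun h => ha h.symm]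

-- ---- B side: the window DP computes jgAns ----

-- all reachable positions, and the prefix-count table the DP tabulates
def jgR (cs : List Char) (mj Mj : Int) : List Int := jgReaches cs mj Mj (cs.length - 1)

def jgCnt (cs : List Char) (mj Mj : Int) (t : Int) : Int :=
  (((jgR cs mj Mj).filter (fun x => decide (x < t))).length : Int)

def jgPre (cs : List Char) (mj Mj : Int) (jn : Nat) : List Int :=
  (List.range (jn + 1)).map (fun m : Nat => jgCnt cs mj Mj ((m : Nat) : Int))

theorem jgR_pairwise (cs : List Char) (mj Mj : Int) : (jgR cs mj Mj).Pairwise (· < ·) :=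
  jgReaches_pairwise cs mj Mj _

theorem jgCnt_pos_iff (cs : List Char) (mj Mj : Int) (a b : Int) (hab : a ≤ b) :
    (0 < jgCnt cs mj Mj b - jgCnt cs mj Mj a) ↔ ∃ x ∈ jgR cs mj Mj, a ≤ x ∧ x < b := by
  unfold jgCnt
  rw [jg_filter_window_split (jgR cs mj Mj) a b hab]
  push_cast
  rw [show ∀ u v : Int, (0 < u + v - u) ↔ 0 < v from fun u v => by omega]
  rw [show ∀ (m : Nat), ((0:Int) < (m:Int)) ↔ 0 < m from fun m => by omega]
  rw [jg_filter_pos_iff]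
  simp

theorem jgCnt_succ (cs : List Char) (mj Mj : Int) (t : Int) :
    jgCnt cs mj Mj (t + 1) = jgCnt cs mj Mj t + (if t ∈ jgR cs mj Mj then 1 else 0) := by
  unfold jgCnt
  rw [jg_filter_window_split (jgR cs mj Mj) t (t + 1) (by omega)]
  rw [jg_filter_single (jgR cs mj Mj) ((jgR_pairwise cs mj Mj).nodup) t]
  split <;> push_cast <;> omega

theorem jg_pre_get (cs : List Char) (mj Mj : Int) (jn : Nat) (idx : Int)
    (h0 : 0 ≤ idx) (h1 : idx ≤ (jn : Int)) :
    PySem.List.pyGetD (jgPre cs mj Mj jn) idx 0 = jgCnt cs mj Mj idx := by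
  unfold jgPre
  rw [PySem.List.pyGetD_eq_getElem _ 0 h0 (by simp; omega)]
  simp only [List.getElem_map, List.getElem_range]
  congr 1
  omega

-- the DP's per-step test equals membership of jn in the reachable set
theorem jg_ok_eq (cs : List Char) (mj Mj : Int) (jn : Nat) (h1 : 1 ≤ jn) (h2 : jn ≤ cs.length - 1) :
    ((PySem.List.pyGet? cs ((jn : Nat) : Int) == some '0')
      && decide (max (((jn : Nat) : Int) - Mj) 0 ≤ min (((jn : Nat) : Int) - mj) (((jn : Nat) : Int) - 1))
      && decide (0 < PySem.List.pyGetD (jgPre cs mj Mj jn)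
                    (min (((jn : Nat) : Int) - mj) (((jn : Nat) : Int) - 1) + 1) 0
                 - PySem.List.pyGetD (jgPre cs mj Mj jn)
                    (max (((jn : Nat) : Int) - Mj) 0) 0))
    = decide (((jn : Nat) : Int) ∈ jgR cs mj Mj) := by
  obtain ⟨k, rfl⟩ : ∃ k, jn = k + 1 := ⟨jn - 1, by omega⟩
  obtain ⟨lo, hlo⟩ : ∃ v : Int, v = max (((k + 1 : Nat) : Int) - Mj) 0 := ⟨_, rfl⟩
  obtain ⟨hi, hhi⟩ : ∃ v : Int, v = min (((k + 1 : Nat) : Int) - mj) (((k + 1 : Nat) : Int) - 1) := ⟨_, rfl⟩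
  rw [← hlo, ← hhi]
  have hmem : (((k + 1 : Nat) : Int) ∈ jgR cs mj Mj) ↔
      (cs[k + 1]? = some '0' ∧ ∃ i ∈ jgReaches cs mj Mj k, jgCov mj Mj i ((k + 1 : Nat) : Int)) := by
    constructor
    · intro hx
      have hx' : ((k + 1 : Nat) : Int) ∈ jgReaches cs mj Mj (k + 1) :=
        mem_jgReaches_restrict (k1 := k + 1) (by omega) hx (by push_cast; omega)
      exact (mem_jgReaches_succ_iff cs mj Mj k).1 hx'
    · intro hx
      exact mem_jgReaches_mono (by omega) ((mem_jgReaches_succ_iff cs mj Mj k).2 hx)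
  by_cases hlohi : lo ≤ hi
  · simp only [jg_pre_get cs mj Mj (k + 1) (hi + 1) (by push_cast at hlohi ⊢; omega) (by push_cast at hlohi ⊢; omega),
      jg_pre_get cs mj Mj (k + 1) lo (by push_cast; omega) (by push_cast at hlohi ⊢; omega),
      PySem.List.pyGet?_natCast]
    have hex : (∃ x ∈ jgR cs mj Mj, lo ≤ x ∧ x < hi + 1) ↔
        (∃ i ∈ jgReaches cs mj Mj k, jgCov mj Mj i ((k + 1 : Nat) : Int)) := by
      constructor
      · rintro ⟨x, hx, hx1, hx2⟩
        have hb := mem_jgReaches_bounds hx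
        refine ⟨x, mem_jgReaches_restrict (k1 := k) (by omega) hx (by omega), by
          constructor <;> omega⟩
      · rintro ⟨i, hi', hc⟩
        have hb := mem_jgReaches_bounds hi'
        obtain ⟨hc1, hc2⟩ := hc
        exact ⟨i, mem_jgReaches_mono (by omega) hi', by omega, by omega⟩
    rw [show (decide (0 < jgCnt cs mj Mj (hi + 1) - jgCnt cs mj Mj lo))
          = decide (∃ x ∈ jgR cs mj Mj, lo ≤ x ∧ x < hi + 1) from by
      simp only [decide_eq_decide]; exact jgCnt_pos_iff cs mj Mj lo (hi + 1) (by omega)]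
    by_cases hc : cs[k + 1]? = some '0'
    · simp only [hc, beq_self_eq_true, Bool.true_and, hlohi, decide_true]
      rw [show (decide (∃ x ∈ jgR cs mj Mj, lo ≤ x ∧ x < hi + 1))
            = decide (((k + 1 : Nat) : Int) ∈ jgR cs mj Mj) from by
        simp only [decide_eq_decide]; rw [hex, hmem]; simp [hc]]
    · have hb : (cs[k + 1]? == some '0') = false := by simpa using hc
      have hn : ¬ (((k : Int) + 1) ∈ jgR cs mj Mj) := by
        push_cast
        exact fun hm => hc (hmem.1 (by push_cast at hm ⊢; exact hm)).1
      simp [hb, hn]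
  · have hnm : ¬ (((k + 1 : Nat) : Int) ∈ jgR cs mj Mj) := by
      intro hx
      obtain ⟨_, i, hi', hc⟩ := hmem.1 hx
      have hb := mem_jgReaches_bounds hi'
      unfold jgCov at hc
      push_cast at hc hb hlohi
      omega
    have hnm' : ¬ (((k : Int) + 1) ∈ jgR cs mj Mj) := by push_cast at hnm ⊢; exact hnm
    simp [hlohi, hnm']

theorem jgAns_iff (cs : List Char) (mj Mj : Int) (hlen : 2 ≤ cs.length) :
    jgAns cs mj Mj = decide ((((cs.length - 1 : Nat)) : Int) ∈ jgR cs mj Mj) := by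
  have hk : cs.length - 1 = (cs.length - 2) + 1 := by omega
  unfold jgAns jgR
  simp only [decide_eq_decide]
  rw [hk]
  rw [mem_jgReaches_succ_iff cs mj Mj (cs.length - 2)]
  rw [show ((cs.length : Int) - 1) = (((cs.length - 2 + 1 : Nat)) : Int) from by omega]
  constructor
  · rintro ⟨_, hc, hx⟩
    exact ⟨hc, hx⟩
  · rintro ⟨hc, hx⟩
    exact ⟨hlen, hc, hx⟩

theorem jgWindow_inv (cs : List Char) (mj Mj : Int) (hlen : 2 ≤ cs.length) :
    ∀ (d jn : Nat), jn + d = cs.length - 1 → 1 ≤ jn →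
    jgWindow cs mj Mj ((cs.length : Int) - 1)
      (PySem.List.pyRange ((jn : Nat) : Int) (((cs.length : Int) - 1) + 1) 1)
      (jgPre cs mj Mj jn) = jgAns cs mj Mj := by
  intro d
  induction d with
  | zero =>
    intro jn hj h1
    have hjn : jn = cs.length - 1 := by omega
    have hcast : ((jn : Nat) : Int) = (cs.length : Int) - 1 := by subst hjn; push_cast; omega
    rw [PySem.List.pyRange_one_cons (by omega)]
    simp only [jgWindow]
    rw [if_pos hcast]
    rw [jg_ok_eq cs mj Mj jn h1 (by omega)]
    rw [jgAns_iff cs mj Mj hlen, hjn]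
  | succ d ih =>
    intro jn hj h1
    have hlt : ((jn : Nat) : Int) < (cs.length : Int) - 1 := by push_cast; omega
    rw [PySem.List.pyRange_one_cons (by omega)]
    simp only [jgWindow]
    rw [if_neg (by omega)]
    have hpre : jgPre cs mj Mj jn
        ++ [PySem.List.pyGetD (jgPre cs mj Mj jn) (-1) 0
            + if ((PySem.List.pyGet? cs ((jn : Nat) : Int) == some '0')
                && decide (max (((jn : Nat) : Int) - Mj) 0 ≤ min (((jn : Nat) : Int) - mj) (((jn : Nat) : Int) - 1))
                && decide (0 < PySem.List.pyGetD (jgPre cs mj Mj jn)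
                              (min (((jn : Nat) : Int) - mj) (((jn : Nat) : Int) - 1) + 1) 0
                           - PySem.List.pyGetD (jgPre cs mj Mj jn)
                              (max (((jn : Nat) : Int) - Mj) 0) 0))
              then 1 else 0]
        = jgPre cs mj Mj (jn + 1) := by
      have hlast : PySem.List.pyGetD (jgPre cs mj Mj jn) (-1) 0 = jgCnt cs mj Mj ((jn : Nat) : Int) := by
        unfold jgPre
        rw [List.range_succ, List.map_append]
        exact PySem.List.pyGetD_neg_one_append_singleton _ _ _
      rw [hlast, jg_ok_eq cs mj Mj jn h1 (by omega)]
      unfold jgPre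
      rw [List.range_succ (n := jn + 1), List.map_append]
      congr 1
      simp only [List.map_cons, List.map_nil, List.cons.injEq, and_true]
      rw [show (((jn + 1 : Nat) : Int)) = ((jn : Nat) : Int) + 1 from by push_cast; ring]
      rw [jgCnt_succ cs mj Mj ((jn : Nat) : Int)]
      simp only [decide_eq_true_eq]
    rw [hpre]
    have := ih (jn + 1) (by omega) (by omega)
    rw [show ((jn : Nat) : Int) + 1 = ((jn + 1 : Nat) : Int) from by push_cast; ring]
    exact this

theorem jgWindow_eq_ans (cs : List Char) (mj Mj : Int) (h : cs ≠ []) :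
    jgWindow cs mj Mj ((cs.length : Int) - 1)
      (PySem.List.pyRange 1 (((cs.length : Int) - 1) + 1) 1) [0, 1] = jgAns cs mj Mj := by
  have hpos : 1 ≤ cs.length := List.length_pos_iff.2 h
  rcases Nat.lt_or_ge cs.length 2 with hlen | hlen
  · have h1 : cs.length = 1 := by omega
    rw [PySem.List.pyRange_one_eq_nil (by rw [h1]; norm_num)]
    simp only [jgWindow]
    unfold jgAns
    rw [h1]
    simp
  · have hinit : ([0, 1] : List Int) = jgPre cs mj Mj 1 := by
      have hc0 : jgCnt cs mj Mj 0 = 0 := by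
        unfold jgCnt
        rw [List.filter_eq_nil_iff.2 (fun x hx => by
          have := mem_jgReaches_bounds hx
          simp only [decide_eq_true_eq, not_lt] at *
          omega)]
        simp
      have hc1 : jgCnt cs mj Mj 1 = 1 := by
        unfold jgCnt
        have : (jgR cs mj Mj).filter (fun x => decide (x < 1)) = [0] := by
          apply jg_sorted_ext ((jgR_pairwise cs mj Mj).filter _) (by simp)
          intro x
          simp only [List.mem_filter, List.mem_cons, List.not_mem_nil, or_false,
            decide_eq_true_eq]
          constructor
          · rintro ⟨hx, hlt⟩
            have := mem_jgReaches_bounds hx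
            omega
          · rintro rfl
            exact ⟨zero_mem_jgReaches cs mj Mj _, by omega⟩
        rw [this]
        simp
      unfold jgPre
      simp [List.range_succ, hc0, hc1]
    rw [hinit]
    have := jgWindow_inv cs mj Mj hlen (cs.length - 1 - 1) 1 (by omega) (by omega)
    simpa using this

-- ---- A side: the BFS computes jgAns ----

-- the queue contents at the moment the last processed position is p:
-- reachable positions beyond p, at most len-2, already covered by a processed position
def jgQ (cs : List Char) (mj Mj p : Int) : List Int :=
  (jgR cs mj Mj).filter (fun j => decide (p < j ∧ j ≤ (cs.length : Int) - 2 ∧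
    ∃ i ∈ jgR cs mj Mj, i ≤ p ∧ jgCov mj Mj i j))

theorem jgInner_spec (cs : List Char) (js : List Int) (acc : List Int) :
    jgInner cs js acc =
      if ∃ j ∈ js, PySem.List.pyGet? cs j = some '0' ∧ j = (cs.length : Int) - 1 then none
      else some (acc ++ js.filter (fun j => decide (PySem.List.pyGet? cs j = some '0'))) := by
  induction js generalizing acc with
  | nil => simp [jgInner]
  | cons j rest ih =>
    simp only [jgInner]
    by_cases hc : PySem.List.pyGet? cs j = some '0'
    · rw [if_pos hc]
      by_cases hj : j = (cs.length : Int) - 1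
      · rw [if_pos hj, if_pos ⟨j, by simp, hc, hj⟩]
      · rw [if_neg hj, ih]
        by_cases hex : ∃ x ∈ rest, PySem.List.pyGet? cs x = some '0' ∧ x = (cs.length : Int) - 1
        · rw [if_pos hex, if_pos (by obtain ⟨x, hx, h⟩ := hex; exact ⟨x, by simp [hx], h⟩)]
        · rw [if_neg hex, if_neg (by
            rintro ⟨x, hx, h⟩
            rcases List.mem_cons.1 hx with rfl | hx'
            · exact hj h.2
            · exact hex ⟨x, hx', h⟩)]
          rw [List.filter_cons_of_pos (by simpa using hc)]
          simp
    · rw [if_neg hc, ih]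
      by_cases hex : ∃ x ∈ rest, PySem.List.pyGet? cs x = some '0' ∧ x = (cs.length : Int) - 1
      · rw [if_pos hex, if_pos (by obtain ⟨x, hx, h⟩ := hex; exact ⟨x, by simp [hx], h⟩)]
      · rw [if_neg hex, if_neg (by
          rintro ⟨x, hx, h⟩
          rcases List.mem_cons.1 hx with rfl | hx'
          · exact hc h.1
          · exact hex ⟨x, hx', h⟩)]
        rw [List.filter_cons_of_neg (by simpa using hc)]

theorem mem_jgR_intro (cs : List Char) (mj Mj : Int) {x i : Int}
    (h1 : 1 ≤ x) (h2 : x ≤ (cs.length : Int) - 1)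
    (hc : PySem.List.pyGet? cs x = some '0')
    (hi : i ∈ jgR cs mj Mj) (hix : i < x) (hcov : jgCov mj Mj i x) :
    x ∈ jgR cs mj Mj := by
  obtain ⟨k, hk⟩ : ∃ k : Nat, x = ((k + 1 : Nat) : Int) :=
    ⟨x.toNat - 1, by omega⟩
  subst hk
  have hklen : k + 1 ≤ cs.length - 1 := by omega
  have hmem : ((k + 1 : Nat) : Int) ∈ jgReaches cs mj Mj (k + 1) := by
    rw [mem_jgReaches_succ_iff cs mj Mj k]
    refine ⟨?_, i, ?_, hcov⟩
    · rw [PySem.List.pyGet?_natCast] at hc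
      exact hc
    · exact mem_jgReaches_restrict (k1 := k) (by omega) hi (by push_cast; omega)
  exact mem_jgReaches_mono (k2 := cs.length - 1) (by omega) hmem

theorem mem_jgR_elim (cs : List Char) (mj Mj : Int) {x : Int}
    (hx : x ∈ jgR cs mj Mj) (hx0 : x ≠ 0) :
    PySem.List.pyGet? cs x = some '0' := by
  have hb := mem_jgReaches_bounds hx
  obtain ⟨k, hk⟩ : ∃ k : Nat, x = ((k + 1 : Nat) : Int) := ⟨x.toNat - 1, by omega⟩
  subst hk
  have hmem : ((k + 1 : Nat) : Int) ∈ jgReaches cs mj Mj (k + 1) :=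
    mem_jgReaches_restrict (k1 := k + 1) (by omega) hx (by push_cast; omega)
  have := (mem_jgReaches_succ_iff cs mj Mj k).1 hmem
  rw [PySem.List.pyGet?_natCast]
  exact this.1

-- every reachable position beyond p has a reachable ancestor just beyond p,
-- covered by a reachable position ≤ p
theorem jg_ancestor (cs : List Char) (mj Mj : Int) :
    ∀ (cn : Nat) (p c : Int), c.toNat = cn → p ∈ jgR cs mj Mj → c ∈ jgR cs mj Mj → p < c →
    ∃ d ∈ jgR cs mj Mj, p < d ∧ d ≤ c ∧ ∃ i ∈ jgR cs mj Mj, i ≤ p ∧ jgCov mj Mj i d := by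
  intro cn
  induction cn using Nat.strong_induction_on with
  | _ cn ih =>
    intro p c hcn hp hc hlt
    have hpb := mem_jgReaches_bounds hp
    have hcb := mem_jgReaches_bounds hc
    obtain ⟨i, hi, hic, hcov⟩ := mem_jgReaches_cov hc (by omega)
    by_cases hip : i ≤ p
    · exact ⟨c, hc, hlt, le_refl c, i, hi, hip, hcov⟩
    · have hib := mem_jgReaches_bounds hi
      obtain ⟨d, hd, h1, h2, h3⟩ :=
        ih i.toNat (by omega) p i rfl hp hi (by omega)
      exact ⟨d, hd, h1, by omega, h3⟩

theorem jg_length_filter_lt {l : List Int} {p : Int → Bool} {x : Int}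
    (hx : x ∈ l) (hpx : p x = false) : (l.filter p).length < l.length := by
  induction l with
  | nil => simp at hx
  | cons a l ih =>
    rcases List.mem_cons.1 hx with rfl | hx'
    · rw [List.filter_cons_of_neg (by simp [hpx])]
      have := List.length_filter_le p l
      simp only [List.length_cons]
      omega
    · by_cases hpa : p a = true
      · rw [List.filter_cons_of_pos hpa]
        have := ih hx'
        simp only [List.length_cons]
        omega
      · rw [List.filter_cons_of_neg (by simpa using hpa)]
        have := ih hx'
        simp only [List.length_cons]
        omega

theorem jg_fuel_decrease (l : List Int) (p i : Int) (hpi : p < i) (hi : i ∈ l) :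
    (l.filter (fun x => decide (i < x))).length < (l.filter (fun x => decide (p < x))).length := by
  have h1 : l.filter (fun x => decide (i < x))
      = (l.filter (fun x => decide (p < x))).filter (fun x => decide (i < x)) := by
    rw [List.filter_filter]
    apply List.filter_congr
    intro x _
    by_cases h : i < x
    · simp [h, lt_trans hpi h]
    · simp [h]
  rw [h1]
  exact jg_length_filter_lt (List.mem_filter.2 ⟨hi, by simpa using hpi⟩) (by simp)

theorem mem_jgQ (cs : List Char) (mj Mj p x : Int) :
    x ∈ jgQ cs mj Mj p ↔ x ∈ jgR cs mj Mj ∧ p < x ∧ x ≤ (cs.length : Int) - 2 ∧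
      ∃ i ∈ jgR cs mj Mj, i ≤ p ∧ jgCov mj Mj i x := by
  simp [jgQ, List.mem_filter]

theorem jgQ_pairwise (cs : List Char) (mj Mj p : Int) : (jgQ cs mj Mj p).Pairwise (· < ·) :=
  (jgR_pairwise cs mj Mj).filter _

-- if the queue for p is empty, no reachable position beyond p can cover anything any more
theorem jg_no_queue (cs : List Char) (mj Mj : Int) {p : Int}
    (hp : p ∈ jgR cs mj Mj) (hqnil : jgQ cs mj Mj p = []) :
    ¬ ∃ i ∈ jgR cs mj Mj, p < i ∧ i ≤ (cs.length : Int) - 2 ∧ jgCov mj Mj i ((cs.length : Int) - 1) := by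
  rintro ⟨i, hi, h1, h2, _⟩
  obtain ⟨d, hd, hd1, hd2, c, hc, hc1, hc2⟩ := jg_ancestor cs mj Mj i.toNat p i rfl hp hi h1
  have : d ∈ jgQ cs mj Mj p := (mem_jgQ cs mj Mj p d).2 ⟨hd, hd1, by omega, c, hc, hc1, hc2⟩
  rw [hqnil] at this
  simp at this

-- the BFS loop invariant: from the state "last processed position p, queue jgQ p,
-- farthest = p + Mj", the loop returns true iff some not-yet-processed reachable
-- position covers the last index
theorem jgBFS_steady (cs : List Char) (mj Mj : Int) (hlen : 2 ≤ cs.length) :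
    ∀ (fuel : Nat) (p : Int), p ∈ jgR cs mj Mj → p ≤ (cs.length : Int) - 2 →
      ((jgR cs mj Mj).filter (fun x => decide (p < x))).length ≤ fuel →
      ¬ (PySem.List.pyGet? cs ((cs.length : Int) - 1) = some '0' ∧
          ∃ i ∈ jgR cs mj Mj, i ≤ p ∧ jgCov mj Mj i ((cs.length : Int) - 1)) →
      jgBFS cs mj Mj fuel (jgQ cs mj Mj p) (p + Mj)
        = decide (PySem.List.pyGet? cs ((cs.length : Int) - 1) = some '0' ∧
            ∃ i ∈ jgR cs mj Mj, p < i ∧ i ≤ (cs.length : Int) - 2 ∧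
              jgCov mj Mj i ((cs.length : Int) - 1)) := by
  intro fuel
  induction fuel with
  | zero =>
    intro p hp hpn hfuel hny
    have hnil : (jgR cs mj Mj).filter (fun x => decide (p < x)) = [] :=
      List.length_eq_zero_iff.1 (by omega)
    have hnone : ∀ x ∈ jgR cs mj Mj, ¬ p < x := by
      intro x hx hpx
      have : x ∈ (jgR cs mj Mj).filter (fun x => decide (p < x)) :=
        List.mem_filter.2 ⟨hx, by simpa using hpx⟩
      rw [hnil] at this
      simp at this
    rw [show jgBFS cs mj Mj 0 (jgQ cs mj Mj p) (p + Mj) = false from rfl]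
    rw [decide_eq_false (by rintro ⟨_, i, hi, h1, _⟩; exact hnone i hi h1)]
  | succ fuel ih =>
    intro p hp hpn hfuel hny
    have hpb := mem_jgReaches_bounds hp
    cases hq : jgQ cs mj Mj p with
    | nil =>
      rw [show jgBFS cs mj Mj (fuel + 1) [] (p + Mj) = false from rfl]
      rw [decide_eq_false (by
        rintro ⟨hcn, i, hi, h1, h2, h3⟩
        exact jg_no_queue cs mj Mj hp hq ⟨i, hi, h1, h2, h3⟩)]
    | cons i rest =>
      have hiQ : i ∈ jgQ cs mj Mj p := by rw [hq]; exact List.mem_cons_self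
      obtain ⟨hiR, hpi, hin, c, hcR, hcp, hccov⟩ := (mem_jgQ cs mj Mj p i).1 hiQ
      have hib := mem_jgReaches_bounds hiR
      have hQpw := jgQ_pairwise cs mj Mj p
      rw [hq] at hQpw
      have hrest_gt : ∀ x ∈ rest, i < x := (List.pairwise_cons.1 hQpw).1
      have hrest_pw : rest.Pairwise (· < ·) := (List.pairwise_cons.1 hQpw).2
      have hmin : ∀ x ∈ jgR cs mj Mj, p < x → i ≤ x := by
        intro x hx hpx
        by_contra hxi
        push_neg at hxi
        obtain ⟨d, hd, hd1, hd2, c', hc', hc1, hc2⟩ :=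
          jg_ancestor cs mj Mj x.toNat p x rfl hp hx hpx
        have hdQ : d ∈ jgQ cs mj Mj p :=
          (mem_jgQ cs mj Mj p d).2 ⟨hd, hd1, by omega, c', hc', hc1, hc2⟩
        rw [hq] at hdQ
        rcases List.mem_cons.1 hdQ with rfl | hdr
        · omega
        · have := hrest_gt d hdr
          omega
      have hfar : i ≤ p + Mj := by
        obtain ⟨h1, h2⟩ := hccov
        omega
      have hstep : jgBFS cs mj Mj (fuel + 1) (i :: rest) (p + Mj)
          = match jgInner cs (PySem.List.pyRange (max (i + mj) ((p + Mj) + 1))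
              (min (i + Mj + 1) (cs.length : Int)) 1) rest with
            | none => true
            | some q' => jgBFS cs mj Mj fuel q' (i + Mj) := rfl
      rw [hstep, jgInner_spec]
      by_cases hearly : ∃ j ∈ PySem.List.pyRange (max (i + mj) ((p + Mj) + 1))
          (min (i + Mj + 1) (cs.length : Int)) 1,
          PySem.List.pyGet? cs j = some '0' ∧ j = (cs.length : Int) - 1
      · rw [if_pos hearly]
        obtain ⟨j, hjr, hj0, rfl⟩ := hearly
        rw [PySem.List.mem_pyRange_one] at hjr
        exact (decide_eq_true ⟨hj0, i, hiR, hpi, hin, by unfold jgCov; omega⟩).symm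
      · rw [if_neg hearly]
        simp only
        -- the new queue is exactly jgQ i
        have happ_mem : ∀ x : Int,
            x ∈ (PySem.List.pyRange (max (i + mj) ((p + Mj) + 1))
              (min (i + Mj + 1) (cs.length : Int)) 1).filter
                (fun j => decide (PySem.List.pyGet? cs j = some '0'))
            ↔ (max (i + mj) ((p + Mj) + 1) ≤ x ∧ x < min (i + Mj + 1) (cs.length : Int))
                ∧ PySem.List.pyGet? cs x = some '0' := by
          intro x
          rw [List.mem_filter, PySem.List.mem_pyRange_one]
          simp
        have hq' : rest ++ (PySem.List.pyRange (max (i + mj) ((p + Mj) + 1))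
              (min (i + Mj + 1) (cs.length : Int)) 1).filter
                (fun j => decide (PySem.List.pyGet? cs j = some '0'))
            = jgQ cs mj Mj i := by
          apply jg_sorted_ext
          · apply List.pairwise_append.2
            refine ⟨hrest_pw, List.Pairwise.filter _ (PySem.List.pairwise_lt_pyRange_one _ _), ?_⟩
            intro x hx y hy
            have hxQ : x ∈ jgQ cs mj Mj p := by rw [hq]; exact List.mem_cons_of_mem _ hx
            obtain ⟨_, _, _, c', hc', hc1, hc2⟩ := (mem_jgQ cs mj Mj p x).1 hxQ
            have hy' := (happ_mem y).1 hy
            obtain ⟨h1', h2'⟩ := hc2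
            omega
          · exact jgQ_pairwise cs mj Mj i
          · intro x
            rw [List.mem_append, happ_mem, mem_jgQ]
            constructor
            · rintro (hxr | ⟨⟨hx1, hx2⟩, hx0⟩)
              · have hxQ : x ∈ jgQ cs mj Mj p := by rw [hq]; exact List.mem_cons_of_mem _ hxr
                obtain ⟨hxR, _, hxn, c', hc', hc1, hc2⟩ := (mem_jgQ cs mj Mj p x).1 hxQ
                exact ⟨hxR, hrest_gt x hxr, hxn, c', hc', by omega, hc2⟩
              · have hxi : i < x := by omega
                have hxn : x ≤ (cs.length : Int) - 2 := by
                  by_contra hxn'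
                  push_neg at hxn'
                  have hxeq : x = (cs.length : Int) - 1 := by omega
                  exact hearly ⟨x, PySem.List.mem_pyRange_one.2 ⟨by omega, by omega⟩, hx0, hxeq⟩
                have hxR : x ∈ jgR cs mj Mj :=
                  mem_jgR_intro cs mj Mj (by omega) (by omega) hx0 hiR hxi
                    ⟨by omega, by omega⟩
                exact ⟨hxR, hxi, hxn, i, hiR, le_refl i, by omega, by omega⟩
            · rintro ⟨hxR, hxi, hxn, c'', hc'', hc''le, hcv1, hcv2⟩
              by_cases hc''p : c'' ≤ p
              · left
                have hxQ : x ∈ jgQ cs mj Mj p :=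
                  (mem_jgQ cs mj Mj p x).2 ⟨hxR, by omega, hxn, c'', hc'', hc''p, hcv1, hcv2⟩
                rw [hq] at hxQ
                rcases List.mem_cons.1 hxQ with rfl | hxr
                · omega
                · exact hxr
              · push_neg at hc''p
                have : i ≤ c'' := hmin c'' hc'' hc''p
                have hc''i : c'' = i := by omega
                subst hc''i
                by_cases hxfar : x ≤ p + Mj
                · left
                  have hxQ : x ∈ jgQ cs mj Mj p :=
                    (mem_jgQ cs mj Mj p x).2
                      ⟨hxR, by omega, hxn, p, hp, le_refl p, by omega, by omega⟩
                  rw [hq] at hxQ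
                  rcases List.mem_cons.1 hxQ with rfl | hxr
                  · omega
                  · exact hxr
                · right
                  refine ⟨⟨by omega, by omega⟩, ?_⟩
                  exact mem_jgR_elim cs mj Mj hxR (by omega)
        rw [hq']
        -- no not-yet condition can hold for i either
        have hnyI : ¬ (PySem.List.pyGet? cs ((cs.length : Int) - 1) = some '0' ∧
            ∃ i' ∈ jgR cs mj Mj, i' ≤ i ∧ jgCov mj Mj i' ((cs.length : Int) - 1)) := by
          rintro ⟨hcn, i', hi'R, hi'le, hcv1, hcv2⟩
          by_cases hi'p : i' ≤ p
          · exact hny ⟨hcn, i', hi'R, hi'p, hcv1, hcv2⟩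
          · push_neg at hi'p
            have : i ≤ i' := hmin i' hi'R hi'p
            have hieq : i' = i := by omega
            subst hieq
            have hnfar : p + Mj < (cs.length : Int) - 1 := by
              by_contra hle
              push_neg at hle
              exact hny ⟨hcn, p, hp, le_refl p, by omega, by omega⟩
            exact hearly ⟨(cs.length : Int) - 1,
              PySem.List.mem_pyRange_one.2 ⟨by omega, by omega⟩, hcn, rfl⟩
        rw [ih i hiR hin (by
          have := jg_fuel_decrease (jgR cs mj Mj) p i hpi hiR
          omega) hnyI]
        -- witnesses beyond p coincide with witnesses beyond i
        congr 1
        apply propext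
        constructor
        · rintro ⟨hcn, i', hi'R, h1, h2, h3⟩
          exact ⟨hcn, i', hi'R, by omega, h2, h3⟩
        · rintro ⟨hcn, i', hi'R, h1, h2, h3⟩
          by_cases h : i < i'
          · exact ⟨hcn, i', hi'R, h, h2, h3⟩
          · exact absurd ⟨hcn, i', hi'R, by omega, h3⟩ hnyI

theorem jgAns_eq_G (cs : List Char) (mj Mj : Int) (hlen : 2 ≤ cs.length) :
    jgAns cs mj Mj = decide (PySem.List.pyGet? cs ((cs.length : Int) - 1) = some '0' ∧
      ∃ i ∈ jgR cs mj Mj, i ≤ (cs.length : Int) - 2 ∧ jgCov mj Mj i ((cs.length : Int) - 1)) := by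
  unfold jgAns
  simp only [decide_eq_decide]
  have hcast : ((cs.length : Int) - 1) = (((cs.length - 1 : Nat)) : Int) := by omega
  rw [show PySem.List.pyGet? cs ((cs.length : Int) - 1) = cs[cs.length - 1]? from by
    rw [hcast, PySem.List.pyGet?_natCast]]
  constructor
  · rintro ⟨_, hc, i, hi, hcov⟩
    have hb := mem_jgReaches_bounds hi
    exact ⟨hc, i, mem_jgReaches_mono (by omega) hi, by omega, hcov⟩
  · rintro ⟨hc, i, hi, hile, hcov⟩
    refine ⟨hlen, hc, i, mem_jgReaches_restrict (by omega) hi (by omega), hcov⟩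

theorem jgBFS_eq_ans (cs : List Char) (mj Mj : Int) (h : cs ≠ []) :
    jgBFS cs mj Mj cs.length [0] 0 = jgAns cs mj Mj := by
  have hpos : 1 ≤ cs.length := List.length_pos_iff.2 h
  obtain ⟨fuel, hfuel⟩ : ∃ f, cs.length = f + 1 := ⟨cs.length - 1, by omega⟩
  rw [hfuel]
  have hstep : jgBFS cs mj Mj (fuel + 1) [0] 0
      = match jgInner cs (PySem.List.pyRange (max (0 + mj) (0 + 1))
          (min (0 + Mj + 1) (cs.length : Int)) 1) [] with
        | none => true
        | some q' => jgBFS cs mj Mj fuel q' (0 + Mj) := rfl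
  rw [hstep, jgInner_spec]
  rcases Nat.lt_or_ge cs.length 2 with hlen | hlen
  · have h1 : cs.length = 1 := by omega
    rw [PySem.List.pyRange_one_eq_nil (by rw [h1]; push_cast; omega)]
    rw [if_neg (by rintro ⟨j, hj, _⟩; simp at hj)]
    simp only [List.filter_nil, List.append_nil]
    rw [show jgBFS cs mj Mj fuel [] (0 + Mj) = false from by cases fuel <;> rfl]
    unfold jgAns
    rw [h1]
    simp
  · by_cases hearly : ∃ j ∈ PySem.List.pyRange (max (0 + mj) (0 + 1))
        (min (0 + Mj + 1) (cs.length : Int)) 1,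
        PySem.List.pyGet? cs j = some '0' ∧ j = (cs.length : Int) - 1
    · rw [if_pos hearly]
      obtain ⟨j, hjr, hj0, rfl⟩ := hearly
      rw [PySem.List.mem_pyRange_one] at hjr
      rw [jgAns_eq_G cs mj Mj hlen]
      exact (decide_eq_true ⟨hj0, 0, zero_mem_jgReaches cs mj Mj _, by omega,
        by unfold jgCov; omega⟩).symm
    · rw [if_neg hearly]
      simp only [List.nil_append]
      have hq0 : (PySem.List.pyRange (max (0 + mj) (0 + 1))
            (min (0 + Mj + 1) (cs.length : Int)) 1).filter
              (fun j => decide (PySem.List.pyGet? cs j = some '0'))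
          = jgQ cs mj Mj 0 := by
        apply jg_sorted_ext
          (List.Pairwise.filter _ (PySem.List.pairwise_lt_pyRange_one _ _))
          (jgQ_pairwise cs mj Mj 0)
        intro x
        rw [List.mem_filter, PySem.List.mem_pyRange_one, mem_jgQ]
        constructor
        · rintro ⟨⟨hx1, hx2⟩, hx0⟩
          have hx0' : PySem.List.pyGet? cs x = some '0' := by simpa using hx0
          have hxn : x ≤ (cs.length : Int) - 2 := by
            by_contra hxn'
            push_neg at hxn'
            have hxeq : x = (cs.length : Int) - 1 := by omega
            exact hearly ⟨x, PySem.List.mem_pyRange_one.2 ⟨hx1, hx2⟩, hx0', hxeq⟩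
          have hxR : x ∈ jgR cs mj Mj :=
            mem_jgR_intro cs mj Mj (by omega) (by omega) hx0'
              (zero_mem_jgReaches cs mj Mj _) (by omega) ⟨by omega, by omega⟩
          exact ⟨hxR, by omega, hxn, 0, zero_mem_jgReaches cs mj Mj _, le_refl 0,
            by omega, by omega⟩
        · rintro ⟨hxR, hx0lt, hxn, i', hi'R, hi'le, hcv1, hcv2⟩
          have hb := mem_jgReaches_bounds hi'R
          have hi0 : i' = 0 := by omega
          subst hi0
          refine ⟨⟨by omega, by omega⟩, by
            simpa using mem_jgR_elim cs mj Mj hxR (by omega)⟩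
      rw [hq0]
      have hny0 : ¬ (PySem.List.pyGet? cs ((cs.length : Int) - 1) = some '0' ∧
          ∃ i ∈ jgR cs mj Mj, i ≤ 0 ∧ jgCov mj Mj i ((cs.length : Int) - 1)) := by
        rintro ⟨hcn, i, hiR, hile, hcv1, hcv2⟩
        have hb := mem_jgReaches_bounds hiR
        have : i = 0 := by omega
        subst this
        exact hearly ⟨(cs.length : Int) - 1,
          PySem.List.mem_pyRange_one.2 ⟨by omega, by omega⟩, hcn, rfl⟩
      rw [jgBFS_steady cs mj Mj hlen fuel 0 (zero_mem_jgReaches cs mj Mj _) (by omega)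
        (by
          have hle := jgReaches_length_le cs mj Mj (cs.length - 1)
          have hlt := jg_length_filter_lt (l := jgR cs mj Mj)
            (p := fun x => decide ((0 : Int) < x)) (x := 0)
            (zero_mem_jgReaches cs mj Mj _) (by simp)
          unfold jgR at *
          omega)
        hny0]
      rw [jgAns_eq_G cs mj Mj hlen]
      congr 1
      apply propext
      constructor
      · rintro ⟨hcn, i, hiR, h1', h2', h3'⟩
        exact ⟨hcn, i, hiR, h2', h3'⟩
      · rintro ⟨hcn, i, hiR, h1', h2'⟩
        by_cases hi0 : 0 < i
        · exact ⟨hcn, i, hiR, hi0, h1', h2'⟩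
        · have hb := mem_jgReaches_bounds hiR
          have : i = 0 := by omega
          subst this
          exact absurd ⟨hcn, 0, hiR, le_refl 0, h2'⟩ hny0

theorem jg_core_eq (cs : List Char) (mj Mj : Int) (h : cs ≠ []) :
    jgBFS cs mj Mj cs.length [0] 0
      = jgWindow cs mj Mj ((cs.length : Int) - 1) (PySem.List.pyRange 1 (((cs.length : Int) - 1) + 1) 1) [0, 1] := by
  rw [jgBFS_eq_ans cs mj Mj h, jgWindow_eq_ans cs mj Mj h]

-- ===== VERDICT (by name: the statement is the Claim_ definition above) =====
theorem jumpGameVII_spec : Claim_equal_jumpGameVII := by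
  intro s mj Mj _hd hpre
  unfold Spec_jumpGameVII jumpGameVII jumpGameVII_alt
  simp only
  split_ifs with h1 h2 h3
  · rfl
  · rfl
  · rfl
  · exact jg_core_eq s.toList mj Mj hpre.1
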